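-- pv_equiv track=rewrite | github.com/hojoungjang/programming-exercises | 5567-결혼식/solution.py | solution
-- ===== SOURCE A (Python) =====
-- from collections import deque
--
-- def solution(graph):
--     sang = 1                        # 상근이 번호 항상 1
--     queue = deque([sang, None])     # None 을 이용해 레벨 구분
--     level = 0
--     visited = set([sang])
--     invitee_cnt = 0
--
--     while queue:
--         # 다음 레벨
--         if queue[0] is None:
--             queue.popleft()
--             if queue:
--                 queue.append(None)
--             level += 1
--             if level > 2:
--                 break
--             continue
--
--         friend = queue.popleft()
--         invitee_cnt += 1
--
--         for next_friend in graph[friend]: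
--             if next_friend not in visited:
--                 visited.add(next_friend)
--                 queue.append(next_friend)
--
--     # 상근이 빼기
--     return invitee_cnt - 1
-- ===== SOURCE B (Python) =====
-- def solution(graph):
--     # Closed-form set algebra: the nodes within 2 hops of node 1 are
--     # {1} | N(1) | (union of N(n) for n in N(1)); no queue, no visited bookkeeping.
--     within = {1} | set(graph[1])
--     for n in graph[1]:
--         within |= set(graph[n])
--     return len(within) - 1
-- ===== Notes on version B (the rewrite author's own statement) =====
-- stated objective: simpler
-- what changed: Replaces the BFS (deque with a None level-sentinel, visited set, pop counter) by the closed-form set identity: answer = |{1} | N(1) | union of N(n) over n in N(1)| - 1, computed with plain set unions and no traversal state.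
-- crash fix: On graphs where node 1 and all its neighbours are present as keys but some node at distance 2 is not, A raises KeyError because its BFS also dereferences the adjacency lists of distance-2 nodes, while B only reads graph[1] and graph[n] for n in graph[1] and returns the count of distinct nodes within 2 hops. — e.g. on solution([(1, [2]), (2, [3])]): A raises KeyError, B returns 2
import Mathlib
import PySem

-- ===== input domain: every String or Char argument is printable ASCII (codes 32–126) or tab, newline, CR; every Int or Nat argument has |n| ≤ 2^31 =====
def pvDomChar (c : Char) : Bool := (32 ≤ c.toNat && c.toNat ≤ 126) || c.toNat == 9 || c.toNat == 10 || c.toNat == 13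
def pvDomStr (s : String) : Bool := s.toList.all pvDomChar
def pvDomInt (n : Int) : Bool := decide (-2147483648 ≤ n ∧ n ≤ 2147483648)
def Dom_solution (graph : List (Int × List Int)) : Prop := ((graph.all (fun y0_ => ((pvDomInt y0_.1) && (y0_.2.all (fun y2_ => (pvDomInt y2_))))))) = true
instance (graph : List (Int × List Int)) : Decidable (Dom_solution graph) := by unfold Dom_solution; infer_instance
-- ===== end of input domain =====

-- B is simpler: the BFS (sentinel-marked deque, visited set, pop counter) is replaced by the
-- closed-form set identity |{1} ∪ N(1) ∪ ⋃_{n∈N(1)} N(n)| - 1 computed with plain set unions.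

-- ===== PORT A =====
-- inner 'for next_friend in graph[friend]' loop: state = (visited, queue)
def bfsStep (vq : PySem.Set Int × List (Option Int)) (nf : Int) : PySem.Set Int × List (Option Int) :=
  if vq.1.contains nf then vq else (vq.1.add nf, vq.2 ++ [some nf])

-- termination helpers for the while-loop (not part of A's algorithm, only its measure)
def bfsMeasure (g : List (Int × List Int)) (v : PySem.Set Int) : Nat :=
  (((g.map Prod.snd).flatten).filter (fun u => !(v.contains u))).length

lemma filter_length_le {p q : Int → Bool} (h : ∀ u, q u = true → p u = true) :
    ∀ (U : List Int), (U.filter q).length ≤ (U.filter p).length := by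
  intro U
  induction U with
  | nil => simp
  | cons u rest ih =>
      by_cases hq : q u = true
      · simp [hq, h u hq]; omega
      · simp only [List.filter_cons]
        simp only [Bool.not_eq_true] at hq
        rw [hq]
        by_cases hp : p u = true
        · simp [hp]; omega
        · simp only [Bool.not_eq_true] at hp; rw [hp]; simpa using ih

lemma filter_length_lt {p q : Int → Bool} (h : ∀ u, q u = true → p u = true) :
    ∀ (U : List Int) (x : Int), x ∈ U → p x = true → q x = false →
      (U.filter q).length < (U.filter p).length := by
  intro U
  induction U with
  | nil => intro x hx; simp at hx
  | cons u rest ih =>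
      intro x hx hp hq
      rcases List.mem_cons.1 hx with rfl | hx'
      · simp [hq, hp]
        have := filter_length_le h rest
        omega
      · by_cases hqu : q u = true
        · simp [hqu, h u hqu]
          exact ih x hx' hp hq
        · simp only [List.filter_cons]
          simp only [Bool.not_eq_true] at hqu; rw [hqu]
          by_cases hpu : p u = true
          · simp [hpu]
            have := ih x hx' hp hq; omega
          · simp only [Bool.not_eq_true] at hpu; rw [hpu]
            simpa using ih x hx' hp hq

lemma measure_add (g : List (Int × List Int)) (v : PySem.Set Int) (x : Int)
    (hx : x ∈ (g.map Prod.snd).flatten) (hnx : v.contains x = false) :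
    bfsMeasure g (v.add x) < bfsMeasure g v := by
  have hxv : x ∉ v := by simpa [PySem.Set.contains] using hnx
  have hadd : v.add x = v ++ [x] := by simp [PySem.Set.add, hxv]
  unfold bfsMeasure
  rw [hadd]
  apply filter_length_lt
  · intro u hu
    simp [PySem.Set.contains] at hu ⊢
    tauto
  · exact hx
  · simp [PySem.Set.contains]
    exact hxv
  · simp [PySem.Set.contains]

lemma getD_sub (g : List (Int × List Int)) (f : Int) :
    ∀ x ∈ (PySem.Dict.mk g).getD f [], x ∈ (g.map Prod.snd).flatten := by
  intro x hx
  simp only [PySem.Dict.getD, PySem.Dict.get?] at hx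
  cases hfind : List.find? (fun p => p.1 == f) (PySem.Dict.mk g).items with
  | none => rw [hfind] at hx; simp at hx
  | some pr =>
      rw [hfind] at hx
      simp only [Option.map_some, Option.getD_some] at hx
      have hmem : pr ∈ g := List.mem_of_find?_eq_some hfind
      exact List.mem_flatten.2 ⟨pr.2, List.mem_map.2 ⟨pr, hmem, rfl⟩, hx⟩

lemma bfsStep_measure (g : List (Int × List Int)) (nbrs : List Int)
    (h : ∀ x ∈ nbrs, x ∈ (g.map Prod.snd).flatten) :
    ∀ (v : PySem.Set Int) (q : List (Option Int)),
      2 * bfsMeasure g (nbrs.foldl bfsStep (v, q)).1 + (nbrs.foldl bfsStep (v, q)).2.length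
        ≤ 2 * bfsMeasure g v + q.length := by
  induction nbrs with
  | nil => intro v q; simp
  | cons nf rest ih =>
      intro v q
      have hrest : ∀ x ∈ rest, x ∈ (g.map Prod.snd).flatten := fun x hx => h x (List.mem_cons_of_mem _ hx)
      by_cases hc : v.contains nf = true
      · have hm : nf ∈ v := by simpa [PySem.Set.contains] using hc
        simpa [List.foldl_cons, bfsStep, hm] using ih hrest v q
      · simp only [Bool.not_eq_true] at hc
        have hm : nf ∉ v := by simpa [PySem.Set.contains] using hc
        simp only [List.foldl_cons, bfsStep, PySem.Set.contains]
        rw [if_neg (by simpa [PySem.Set.contains] using hc)]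
        have h1 := ih hrest (v.add nf) (q ++ [some nf])
        have h2 := measure_add g v nf (h nf (List.mem_cons_self)) hc
        simp only [List.length_append, List.length_cons, List.length_nil] at h1 ⊢
        omega

-- A's while-loop: queue of Option Int (None = level sentinel), level, visited, invitee_cnt
def bfsLoop (g : List (Int × List Int)) (queue : List (Option Int)) (level : Int)
    (visited : PySem.Set Int) (cnt : Int) : Int :=
  match queue with
  | [] => cnt - 1
  | none :: rest =>
      let q1 := if rest.isEmpty then rest else rest ++ [none]
      if level + 1 > 2 then cnt - 1
      else bfsLoop g q1 (level + 1) visited cnt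
  | some f :: rest =>
      let vq := ((PySem.Dict.mk g).getD f []).foldl bfsStep (visited, rest)
      bfsLoop g vq.2 level vq.1 (cnt + 1)
termination_by ((3 - level).toNat, 2 * bfsMeasure g visited + queue.length)
decreasing_by
  · apply Prod.Lex.left; omega
  · apply Prod.Lex.right
    have := bfsStep_measure g ((PySem.Dict.mk g).getD f []) (getD_sub g f) visited rest
    simp only [List.length_cons]
    omega

def solution (graph : List (Int × List Int)) : Int :=
  bfsLoop graph [some 1, none] 0 (PySem.Set.ofList [1]) 0

-- ===== PORT B =====
-- within = {1} | set(graph[1]);  for n in graph[1]: within |= set(graph[n]);  len(within) - 1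
def solution_alt (graph : List (Int × List Int)) : Int :=
  let n1 := (PySem.Dict.mk graph).getD 1 []
  let w0 := PySem.Set.union (PySem.Set.ofList [1]) n1
  let w := n1.foldl (fun w n => PySem.Set.union w ((PySem.Dict.mk graph).getD n [])) w0
  PySem.Set.len w - 1

-- ===== PRECONDITION & SPEC =====
-- Pre_ excludes exactly the inputs on which A raises KeyError: graph must have key 1 and a
-- key for every node at distance ≤ 2 from node 1 (A dereferences graph[] for all of them).
def Pre_solution (graph : List (Int × List Int)) : Prop :=
  ((PySem.Dict.mk graph).get? 1).isSome = true ∧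
  ∀ x ∈ (PySem.Dict.mk graph).getD 1 [],
    ((PySem.Dict.mk graph).get? x).isSome = true ∧
    ∀ y ∈ (PySem.Dict.mk graph).getD x [],
      ((PySem.Dict.mk graph).get? y).isSome = true

instance (graph : List (Int × List Int)) : Decidable (Pre_solution graph) := by
  unfold Pre_solution; infer_instance

def pvWitness_solution : (List (Int × List Int)) := [(1, [2]), (2, [1])]

-- A raises KeyError when some distance-2 node is missing from graph (its BFS dereferences
-- graph[] for distance-2 nodes too); B only reads graph[1] and graph[n] for n in graph[1]
-- and returns the count of distinct nodes within 2 hops.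
def Raises_solution (graph : List (Int × List Int)) : Prop :=
  ((PySem.Dict.mk graph).get? 1).isSome = true ∧
  (∀ x ∈ (PySem.Dict.mk graph).getD 1 [],
    ((PySem.Dict.mk graph).get? x).isSome = true) ∧
  (∃ x ∈ (PySem.Dict.mk graph).getD 1 [],
    ∃ y ∈ (PySem.Dict.mk graph).getD x [],
      ((PySem.Dict.mk graph).get? y).isSome = false)

instance (graph : List (Int × List Int)) : Decidable (Raises_solution graph) := by
  unfold Raises_solution; infer_instance

def pvRaiseWitness_solution : (List (Int × List Int)) := [(1, [2]), (2, [3])]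
def pvRaiseWitnessOut_solution : Int := 2

def Spec_solution (graph : List (Int × List Int)) (out : Int) : Prop := out = solution_alt graph
instance (graph : List (Int × List Int)) (out : Int) : Decidable (Spec_solution graph out) := by
  unfold Spec_solution; infer_instance

-- ===== CLAIM (what is proved, stated in full; the proofs are below) =====
def Claim_equal_solution : Prop := ∀ (graph : List (Int × List Int)), Dom_solution graph → Pre_solution graph → Spec_solution graph (solution graph)

def Claim_raises_solution : Prop := (∀ (graph : List (Int × List Int)), Dom_solution graph → Raises_solution graph → ¬ Pre_solution graph) ∧ (Dom_solution (pvRaiseWitness_solution) ∧ Raises_solution (pvRaiseWitness_solution) ∧ solution_alt (pvRaiseWitness_solution) = pvRaiseWitnessOut_solution)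

-- ===== LEMMAS AND PROOFS =====

-- adjacency lookup shorthand
def adj (g : List (Int × List Int)) (n : Int) : List Int := (PySem.Dict.mk g).getD n []

-- B's accumulated set, named for the proofs
def bSet (g : List (Int × List Int)) : PySem.Set Int :=
  (adj g 1).foldl (fun w n => PySem.Set.update w (adj g n))
    (PySem.Set.update (PySem.Set.ofList [1]) (adj g 1))

-- one round of level expansion, shared shape of A's per-level processing
def lvlStep (s : PySem.Set Int × List Int) (nb : Int) : PySem.Set Int × List Int :=
  if s.1.contains nb then s else (s.1.add nb, s.2 ++ [nb])

def collect (g : List (Int × List Int)) (v : PySem.Set Int) (fs : List Int) :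
    PySem.Set Int × List Int :=
  fs.foldl (fun acc node => (adj g node).foldl lvlStep acc) (v, [])

lemma lvlStep_shift (nbrs : List Int) :
    ∀ (v : PySem.Set Int) (q : List Int),
      nbrs.foldl lvlStep (v, q)
        = ((nbrs.foldl lvlStep (v, [])).1, q ++ (nbrs.foldl lvlStep (v, [])).2) := by
  induction nbrs with
  | nil => intro v q; simp
  | cons nf rest ih =>
      intro v q
      by_cases hc : v.contains nf = true
      · simp only [List.foldl_cons, lvlStep, hc, if_true]
        exact ih v q
      · simp only [Bool.not_eq_true] at hc
        simp only [List.foldl_cons, lvlStep, hc, Bool.false_eq_true, if_false]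
        rw [ih (v.add nf) (q ++ [nf])]
        rw [show ([] ++ [nf] : List Int) = [nf] from rfl] at *
        rw [ih (v.add nf) [nf]]
        simp

lemma lvlStep_growth (nbrs : List Int) :
    ∀ (v : PySem.Set Int),
      (nbrs.foldl lvlStep (v, [])).1 = v ++ (nbrs.foldl lvlStep (v, [])).2 := by
  induction nbrs with
  | nil => intro v; simp
  | cons nf rest ih =>
      intro v
      by_cases hc : v.contains nf = true
      · simp only [List.foldl_cons, lvlStep, hc, if_true]
        exact ih v
      · simp only [Bool.not_eq_true] at hc
        simp only [List.foldl_cons, lvlStep, hc, Bool.false_eq_true, if_false]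
        rw [show ([] ++ [nf] : List Int) = [nf] from rfl]
        rw [lvlStep_shift rest (v.add nf) [nf]]
        have hm : nf ∉ v := by simpa [PySem.Set.contains] using hc
        have hadd : v.add nf = v ++ [nf] := by simp [PySem.Set.add, hm]
        rw [ih (v.add nf), hadd]
        simp

lemma lvlStep_fst (nbrs : List Int) :
    ∀ (v : PySem.Set Int) (q : List Int),
      (nbrs.foldl lvlStep (v, q)).1 = PySem.Set.update v nbrs := by
  induction nbrs with
  | nil => intro v q; simp [PySem.Set.update]
  | cons nf rest ih =>
      intro v q
      simp only [List.foldl_cons, PySem.Set.update] at *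
      by_cases hc : v.contains nf = true
      · have hm : nf ∈ v := by simpa [PySem.Set.contains] using hc
        have : PySem.Set.add v nf = v := by simp [PySem.Set.add, hm]
        rw [this]
        simp only [lvlStep, hc, if_true]
        exact ih v q
      · simp only [Bool.not_eq_true] at hc
        simp only [lvlStep, hc, Bool.false_eq_true, if_false]
        exact ih (v.add nf) (q ++ [nf])

lemma collect_fst_aux (g : List (Int × List Int)) (fs : List Int) :
    ∀ (v : PySem.Set Int) (q : List Int),
      (fs.foldl (fun acc node => (adj g node).foldl lvlStep acc) (v, q)).1
        = fs.foldl (fun w f => PySem.Set.update w (adj g f)) v := by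
  induction fs with
  | nil => intro v q; rfl
  | cons f fs' ih =>
      intro v q
      simp only [List.foldl_cons]
      rw [show ((adj g f).foldl lvlStep (v, q))
            = (((adj g f).foldl lvlStep (v, q)).1, ((adj g f).foldl lvlStep (v, q)).2) from rfl]
      rw [ih _ _, lvlStep_fst]

lemma collect_fst (g : List (Int × List Int)) (v : PySem.Set Int) (fs : List Int) :
    (collect g v fs).1 = fs.foldl (fun w f => PySem.Set.update w (adj g f)) v :=
  collect_fst_aux g fs v []

lemma bfsStep_shift (nbrs : List Int) :
    ∀ (v : PySem.Set Int) (q : List (Option Int)),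
      nbrs.foldl bfsStep (v, q)
        = ((nbrs.foldl lvlStep (v, [])).1,
           q ++ ((nbrs.foldl lvlStep (v, [])).2).map some) := by
  induction nbrs with
  | nil => intro v q; simp
  | cons nf rest ih =>
      intro v q
      by_cases hc : v.contains nf = true
      · simp only [List.foldl_cons, bfsStep, lvlStep, hc, if_true]
        exact ih v q
      · simp only [Bool.not_eq_true] at hc
        simp only [List.foldl_cons, bfsStep, lvlStep, hc, Bool.false_eq_true, if_false]
        rw [ih (v.add nf) (q ++ [some nf])]
        rw [show ([] ++ [nf] : List Int) = [nf] from rfl]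
        rw [lvlStep_shift rest (v.add nf) [nf]]
        simp

lemma collect_cons (g : List (Int × List Int)) (f : Int) (fs : List Int) (v : PySem.Set Int) :
    collect g v (f :: fs)
      = ((collect g (((adj g f).foldl lvlStep (v, [])).1) fs).1,
         ((adj g f).foldl lvlStep (v, [])).2
           ++ (collect g (((adj g f).foldl lvlStep (v, [])).1) fs).2) := by
  have shift : ∀ (fs : List Int) (v : PySem.Set Int) (l : List Int),
      fs.foldl (fun acc node => (adj g node).foldl lvlStep acc) (v, l)
        = ((collect g v fs).1, l ++ (collect g v fs).2) := by
    intro fs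
    induction fs with
    | nil => intro v l; simp [collect]
    | cons f' fs' ih =>
        intro v l
        simp only [List.foldl_cons, collect]
        rw [lvlStep_shift (adj g f') v l]
        rw [ih, ih]
        simp
  simp only [collect, List.foldl_cons]
  rw [shift fs _ _]
  rfl

lemma collect_growth (g : List (Int × List Int)) (fs : List Int) :
    ∀ (v : PySem.Set Int), (collect g v fs).1 = v ++ (collect g v fs).2 := by
  induction fs with
  | nil => intro v; simp [collect]
  | cons f fs' ih =>
      intro v
      rw [collect_cons]
      rw [ih, lvlStep_growth]
      simp

lemma bfsLoop_nil (g : List (Int × List Int)) (lvl : Int) (v : PySem.Set Int) (c : Int) :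
    bfsLoop g [] lvl v c = c - 1 := by
  rw [bfsLoop]

lemma bfsLoop_none (g : List (Int × List Int)) (rest : List (Option Int)) (lvl : Int)
    (v : PySem.Set Int) (c : Int) :
    bfsLoop g (none :: rest) lvl v c
      = if lvl + 1 > 2 then c - 1
        else bfsLoop g (if rest.isEmpty then rest else rest ++ [none]) (lvl + 1) v c := by
  conv_lhs => rw [bfsLoop]

lemma bfsLoop_some (g : List (Int × List Int)) (f : Int) (rest : List (Option Int)) (lvl : Int)
    (v : PySem.Set Int) (c : Int) :
    bfsLoop g (some f :: rest) lvl v c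
      = bfsLoop g ((adj g f).foldl bfsStep (v, rest)).2 lvl
          ((adj g f).foldl bfsStep (v, rest)).1 (c + 1) := by
  conv_lhs => rw [bfsLoop]
  rfl

lemma drain (g : List (Int × List Int)) (fs : List Int) :
    ∀ (q : List (Option Int)) (lvl : Int) (v : PySem.Set Int) (c : Int),
      bfsLoop g (fs.map some ++ none :: q) lvl v c
        = bfsLoop g (none :: (q ++ ((collect g v fs).2).map some)) lvl (collect g v fs).1
            (c + (fs.length : Int)) := by
  induction fs with
  | nil => intro q lvl v c; simp [collect]
  | cons f fs' ih =>
      intro q lvl v c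
      rw [show ((f :: fs').map some ++ none :: q) = some f :: (fs'.map some ++ none :: q) by simp]
      rw [bfsLoop_some, bfsStep_shift]
      rw [show ((fs'.map some ++ none :: q)
            ++ ((adj g f).foldl lvlStep (v, [])).2.map some)
          = fs'.map some ++ none
              :: (q ++ ((adj g f).foldl lvlStep (v, [])).2.map some) by simp]
      rw [ih]
      rw [collect_cons]
      simp only [List.map_append, List.append_assoc, List.length_cons]
      congr 1
      push_cast
      ring

lemma set_one : PySem.Set.ofList ([1] : List Int) = [1] := by decide

-- A's final visited set: the result of the two rounds of level expansion
def aSet (g : List (Int × List Int)) : PySem.Set Int :=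
  (collect g (collect g (PySem.Set.ofList [1]) [1]).1
    (collect g (PySem.Set.ofList [1]) [1]).2).1

lemma A_eq_len (g : List (Int × List Int)) :
    solution g = PySem.Set.len (aSet g) - 1 := by
  unfold solution aSet
  rw [set_one]
  rw [show ([some 1, none] : List (Option Int))
      = ([(1 : Int)].map some ++ none :: ([] : List (Option Int))) by simp]
  rw [drain]
  rw [bfsLoop_none]
  rw [if_neg (by norm_num)]
  have hg1 : (collect g ([1] : PySem.Set Int) [1]).1
      = [1] ++ (collect g ([1] : PySem.Set Int) [1]).2 := collect_growth g [1] [1]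
  by_cases ha1 : (collect g ([1] : PySem.Set Int) [1]).2 = []
  · simp only [ha1, List.map_nil, List.append_nil, List.isEmpty_nil, if_true]
    rw [bfsLoop_nil]
    have hc2 : collect g (collect g ([1] : PySem.Set Int) [1]).1 []
        = ((collect g ([1] : PySem.Set Int) [1]).1, ([] : List Int)) := by simp [collect]
    rw [hc2, hg1, ha1]
    simp [PySem.Set.len]
  · rw [if_neg (by simp [ha1])]
    rw [show (([] : List (Option Int))
          ++ ((collect g ([1] : PySem.Set Int) [1]).2).map some ++ [none])
        = (((collect g ([1] : PySem.Set Int) [1]).2).map some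
            ++ none :: ([] : List (Option Int))) by simp]
    rw [drain]
    rw [bfsLoop_none]
    rw [if_neg (by norm_num)]
    have hg2 : (collect g (collect g ([1] : PySem.Set Int) [1]).1
          (collect g ([1] : PySem.Set Int) [1]).2).1
        = (collect g ([1] : PySem.Set Int) [1]).1
            ++ (collect g (collect g ([1] : PySem.Set Int) [1]).1
              (collect g ([1] : PySem.Set Int) [1]).2).2 := collect_growth g _ _
    by_cases ha2 : (collect g (collect g ([1] : PySem.Set Int) [1]).1
        (collect g ([1] : PySem.Set Int) [1]).2).2 = []
    · simp only [ha2, List.map_nil, List.append_nil, List.isEmpty_nil, if_true]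
      rw [bfsLoop_nil]
      rw [hg2, ha2, hg1]
      simp [PySem.Set.len]
    · rw [if_neg (by simp [ha2])]
      rw [show (([] : List (Option Int))
            ++ ((collect g (collect g ([1] : PySem.Set Int) [1]).1
              (collect g ([1] : PySem.Set Int) [1]).2).2).map some ++ [none])
          = (((collect g (collect g ([1] : PySem.Set Int) [1]).1
              (collect g ([1] : PySem.Set Int) [1]).2).2).map some
              ++ none :: ([] : List (Option Int))) by simp]
      rw [drain]
      rw [bfsLoop_none]
      rw [if_pos (by norm_num)]
      rw [hg2, hg1]
      simp [PySem.Set.len]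
      ring

lemma B_eq_len (g : List (Int × List Int)) :
    solution_alt g = PySem.Set.len (bSet g) - 1 := rfl

-- membership and nodup facts for the two sets
lemma mem_foldl_update (g : List (Int × List Int)) (fs : List Int) :
    ∀ (v : PySem.Set Int) (x : Int),
      x ∈ fs.foldl (fun w f => PySem.Set.update w (adj g f)) v
        ↔ x ∈ v ∨ ∃ f ∈ fs, x ∈ adj g f := by
  induction fs with
  | nil => intro v x; simp
  | cons f fs' ih =>
      intro v x
      simp only [List.foldl_cons]
      rw [ih]
      simp [PySem.Set.mem_update]
      tauto

lemma nodup_foldl_update (g : List (Int × List Int)) (fs : List Int) :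
    ∀ (v : PySem.Set Int), v.Nodup →
      (fs.foldl (fun w f => PySem.Set.update w (adj g f)) v).Nodup := by
  induction fs with
  | nil => intro v hv; exact hv
  | cons f fs' ih =>
      intro v hv
      simp only [List.foldl_cons]
      exact ih _ (PySem.Set.nodup_update v (adj g f) hv)

lemma nodup_one : (([1] : List Int)).Nodup := by decide

lemma v1_eq (g : List (Int × List Int)) :
    (collect g (PySem.Set.ofList [1]) [1]).1
      = PySem.Set.update ([1] : PySem.Set Int) (adj g 1) := by
  rw [set_one, collect_fst]
  rfl

lemma mem_v1 (g : List (Int × List Int)) (x : Int) :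
    x ∈ (collect g (PySem.Set.ofList [1]) [1]).1 ↔ x = 1 ∨ x ∈ adj g 1 := by
  rw [v1_eq]
  simp [PySem.Set.mem_update]

lemma nodup_v1 (g : List (Int × List Int)) :
    ((collect g (PySem.Set.ofList [1]) [1]).1).Nodup := by
  rw [v1_eq]
  exact PySem.Set.nodup_update _ _ nodup_one

-- the level-1 frontier is exactly the new elements: N(1) minus node 1 (as a set)
lemma mem_f1 (g : List (Int × List Int)) (x : Int) :
    x ∈ (collect g (PySem.Set.ofList [1]) [1]).2
      ↔ (x = 1 ∨ x ∈ adj g 1) ∧ x ≠ 1 := by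
  have hg : (collect g (PySem.Set.ofList [1]) [1]).1
      = 1 :: (collect g (PySem.Set.ofList [1]) [1]).2 := by
    rw [show (1 :: (collect g (PySem.Set.ofList [1]) [1]).2)
        = [1] ++ (collect g (PySem.Set.ofList [1]) [1]).2 from rfl]
    rw [← set_one]
    exact collect_growth g [1] _
  have hnd := nodup_v1 g
  rw [hg] at hnd
  have h1 : (1 : Int) ∉ (collect g (PySem.Set.ofList [1]) [1]).2 :=
    (List.nodup_cons.1 hnd).1
  constructor
  · intro hx
    have hv : x ∈ (collect g (PySem.Set.ofList [1]) [1]).1 := by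
      rw [hg]; exact List.mem_cons_of_mem _ hx
    refine ⟨(mem_v1 g x).1 hv, ?_⟩
    rintro rfl; exact h1 hx
  · rintro ⟨hv, hne⟩
    have : x ∈ (collect g (PySem.Set.ofList [1]) [1]).1 := (mem_v1 g x).2 hv
    rw [hg] at this
    rcases List.mem_cons.1 this with rfl | h
    · exact absurd rfl hne
    · exact h

lemma mem_aSet (g : List (Int × List Int)) (x : Int) :
    x ∈ aSet g
      ↔ (x = 1 ∨ x ∈ adj g 1)
        ∨ ∃ f, ((f = 1 ∨ f ∈ adj g 1) ∧ f ≠ 1) ∧ x ∈ adj g f := by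
  unfold aSet
  rw [collect_fst, mem_foldl_update, mem_v1]
  constructor
  · rintro (h | ⟨f, hf, hx⟩)
    · exact Or.inl h
    · exact Or.inr ⟨f, (mem_f1 g f).1 hf, hx⟩
  · rintro (h | ⟨f, hf, hx⟩)
    · exact Or.inl h
    · exact Or.inr ⟨f, (mem_f1 g f).2 hf, hx⟩

lemma nodup_aSet (g : List (Int × List Int)) : (aSet g).Nodup := by
  unfold aSet
  rw [collect_fst]
  exact nodup_foldl_update g _ _ (nodup_v1 g)

lemma mem_bSet (g : List (Int × List Int)) (x : Int) :
    x ∈ bSet g ↔ (x = 1 ∨ x ∈ adj g 1) ∨ ∃ n ∈ adj g 1, x ∈ adj g n := by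
  unfold bSet
  rw [mem_foldl_update]
  rw [set_one]
  simp [PySem.Set.mem_update]

lemma nodup_bSet (g : List (Int × List Int)) : (bSet g).Nodup := by
  unfold bSet
  apply nodup_foldl_update
  rw [set_one]
  exact PySem.Set.nodup_update _ _ nodup_one

lemma mem_iff (g : List (Int × List Int)) (x : Int) : x ∈ aSet g ↔ x ∈ bSet g := by
  rw [mem_aSet, mem_bSet]
  constructor
  · rintro (h | ⟨f, ⟨hf1, hne⟩, hx⟩)
    · exact Or.inl h
    · rcases hf1 with rfl | hf
      · exact absurd rfl hne
      · exact Or.inr ⟨f, hf, hx⟩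
  · rintro (h | ⟨n, hn, hx⟩)
    · exact Or.inl h
    · by_cases hne : n = 1
      · subst hne
        exact Or.inl (Or.inr hx)
      · exact Or.inr ⟨n, ⟨Or.inr hn, hne⟩, hx⟩

lemma len_eq (g : List (Int × List Int)) :
    PySem.Set.len (aSet g) = PySem.Set.len (bSet g) := by
  have hperm : (aSet g).Perm (bSet g) :=
    (List.perm_ext_iff_of_nodup (nodup_aSet g) (nodup_bSet g)).2 (mem_iff g)
  simp [PySem.Set.len, hperm.length_eq]

lemma main_eq (g : List (Int × List Int)) : solution g = solution_alt g := by
  rw [A_eq_len, B_eq_len, len_eq]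

-- ===== VERDICT (by name: the statement is the Claim_ definition above) =====
theorem solution_spec : Claim_equal_solution := by
  intro g _ _
  exact main_eq g

theorem solution_raises : Claim_raises_solution := by
  unfold Claim_raises_solution
  constructor
  · rintro g _ ⟨h1, h2, x, hx, y, hy, hnone⟩ ⟨p1, p2⟩
    have := (p2 x hx).2 y hy
    rw [this] at hnone
    simp at hnone
  · exact ⟨by decide, by decide, by decide⟩

-- self-check: the stated raise witness really lies inside Raises_solution
theorem solution_raises_witness : Raises_solution pvRaiseWitness_solution :=
  solution_raises.2.2.1
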